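-- pv_equiv track=rewrite | github.com/ivgnk/Pyton-Codewars-Leetcode | Leetcode/2221_medi_Find Triangular Sum of an Array.py | triangularSum2
-- ===== SOURCE A (Python) =====
-- def triangularSum2(nums):
--     """
--     :type nums: List[int]
--     :rtype: int
--     """
--     ll=len(nums); t1=nums; t2=[]
--     for i in range(ll-1):
--         ll1=len(t1)
--         for j in range(1,ll1):
--             t2.append((t1[j]+t1[j-1])%10)
--         t1=t2
--         t2=[]
--     return t1[0]
-- ===== SOURCE B (Python) =====
-- def triangularSum2(nums):
--     # Closed form: result = sum(C(n-1, i) * nums[i]) % 10, with the binomial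
--     # coefficient maintained incrementally in one pass (exact integer division).
--     n = len(nums)
--     if n == 1:
--         return nums[0]
--     total = 0
--     c = 1  # C(n-1, i)
--     for i, x in enumerate(nums):
--         total += x * c
--         c = c * (n - 1 - i) // (i + 1)
--     return total % 10
-- ===== Notes on version B (the rewrite author's own statement) =====
-- stated objective: faster
-- what changed: Replaces the O(n^2) repeated pairwise mod-10 reduction with a single pass computing the closed form sum(C(n-1,i)*nums[i]) % 10, maintaining the binomial coefficient incrementally by exact integer division.
import Mathlib
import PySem

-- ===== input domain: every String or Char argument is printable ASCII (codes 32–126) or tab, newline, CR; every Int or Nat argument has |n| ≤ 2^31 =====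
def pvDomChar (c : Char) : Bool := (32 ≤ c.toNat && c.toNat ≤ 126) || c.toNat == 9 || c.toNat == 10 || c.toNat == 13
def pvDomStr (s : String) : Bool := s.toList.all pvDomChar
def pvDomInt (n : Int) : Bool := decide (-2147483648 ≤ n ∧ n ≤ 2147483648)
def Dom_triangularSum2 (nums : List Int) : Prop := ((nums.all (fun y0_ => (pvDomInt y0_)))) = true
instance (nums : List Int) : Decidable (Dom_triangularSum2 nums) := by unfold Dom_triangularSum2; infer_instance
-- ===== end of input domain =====

-- B replaces A's O(n^2) repeated pairwise mod-10 reduction by a single pass computing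
-- the closed form (sum of C(n-1,i)*nums[i]) % 10 with an incrementally maintained binomial.

-- ===== PORT A =====
-- inner loop: for j in range(1, len(t1)): t2.append((t1[j] + t1[j-1]) % 10)
def tsInner (t1 : List Int) : List Int :=
  (PySem.List.pyRange 1 (t1.length : Int) 1).foldl
    (fun t2 j => t2 ++ [PySem.Int.mod (PySem.List.pyGetD t1 j 0 + PySem.List.pyGetD t1 (j - 1) 0) 10]) []

-- outer loop: for i in range(ll - 1): t1 = <inner pass>; finally return t1[0]
def triangularSum2 (nums : List Int) : Int :=
  (PySem.List.pyGet?
    ((PySem.List.pyRange 0 ((nums.length : Int) - 1) 1).foldl (fun t1 _ => tsInner t1) nums)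
    0).getD 0   -- t1[0]; the none case (IndexError on []) is excluded by Pre_

-- ===== PORT B =====
def triangularSum2_alt (nums : List Int) : Int :=
  if (nums.length : Int) = 1 then (PySem.List.pyGet? nums 0).getD 0
  else
    PySem.Int.mod
      ((PySem.List.enumerate nums 0).foldl
        (fun (tc : Int × Int) p =>
          (tc.1 + p.2 * tc.2,
           PySem.Int.floordiv (tc.2 * ((nums.length : Int) - 1 - p.1)) (p.1 + 1)))
        (0, 1)).1 10

-- ===== PRECONDITION & SPEC =====
-- A raises IndexError on the empty list (t1[0]); Pre_ excludes exactly that input.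
def Pre_triangularSum2 (nums : List Int) : Prop := nums ≠ []
instance (nums : List Int) : Decidable (Pre_triangularSum2 nums) := by unfold Pre_triangularSum2; infer_instance
def pvWitness_triangularSum2 : List Int := [3, 1, 5, 9]

def Spec_triangularSum2 (nums : List Int) (out : Int) : Prop := out = triangularSum2_alt nums
instance (nums : List Int) (out : Int) : Decidable (Spec_triangularSum2 nums out) := by unfold Spec_triangularSum2; infer_instance

-- ===== CLAIM (what is proved, stated in full; the proofs are below) =====
def Claim_equal_triangularSum2 : Prop := ∀ (nums : List Int), Dom_triangularSum2 nums → Pre_triangularSum2 nums → Spec_triangularSum2 nums (triangularSum2 nums)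

-- ===== LEMMAS AND PROOFS =====

-- the weighted sum both programs compute: Σ_{t ≤ k} C(k,t) * xs[j+t]
def tsSum (k : Nat) (xs : List Int) (j : Nat) : Int :=
  ∑ t ∈ Finset.range (k + 1), (Nat.choose k t : Int) * xs.getD (j + t) 0

lemma myGetD (f : Nat → Int) (m j : Nat) (hj : j < m) :
    ((List.range m).map f).getD j 0 = f j := by
  simp [List.getD_eq_getElem?_getD, hj]

-- A's inner pass, as a map over indices
lemma tsInner_eq (xs : List Int) :
    tsInner xs = (List.range (xs.length - 1)).map
      (fun k => (xs.getD (k + 1) 0 + xs.getD k 0) % 10) := by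
  unfold tsInner
  rw [PySem.List.foldl_append_singleton_eq_map, PySem.List.pyRange_one, List.map_map,
    List.nil_append]
  have h1 : ((xs.length : Int) - 1).toNat = xs.length - 1 := by omega
  rw [h1]
  apply List.map_congr_left
  intro k hk
  simp only [Function.comp]
  have e1 : (1 : Int) + (k : Int) - 1 = ((k : Nat) : Int) := by ring
  have e2 : (1 : Int) + (k : Int) = ((k + 1 : Nat) : Int) := by push_cast; ring
  rw [e1, e2, PySem.List.pyGetD_natCast, PySem.List.pyGetD_natCast,
    PySem.Int.mod_eq_emod_of_pos (by norm_num)]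

lemma foldl_const_iterate {α β : Type} (g : α → α) (l : List β) (s : α) :
    l.foldl (fun t _ => g t) s = g^[l.length] s := by
  induction l generalizing s with
  | nil => simp
  | cons x xs ih => simpa [List.foldl_cons] using ih (g s)

-- Pascal's rule lifted to the weighted sums
lemma pascal_sum (k : Nat) (f : Nat → Int) :
    (∑ t ∈ Finset.range (k + 1), (k.choose t : Int) * f (t + 1))
      + ∑ t ∈ Finset.range (k + 1), (k.choose t : Int) * f t
    = ∑ t ∈ Finset.range (k + 2), ((k + 1).choose t : Int) * f t := by
  have hr : ∑ t ∈ Finset.range (k + 2), ((k + 1).choose t : Int) * f t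
      = (∑ t ∈ Finset.range (k + 1), ((k + 1).choose (t + 1) : Int) * f (t + 1)) + f 0 := by
    rw [Finset.sum_range_succ']; simp
  have hsplit : ∑ t ∈ Finset.range (k + 1), ((k + 1).choose (t + 1) : Int) * f (t + 1)
      = (∑ t ∈ Finset.range (k + 1), (k.choose t : Int) * f (t + 1))
        + ∑ t ∈ Finset.range (k + 1), (k.choose (t + 1) : Int) * f (t + 1) := by
    rw [← Finset.sum_add_distrib]
    apply Finset.sum_congr rfl
    intro t _
    rw [Nat.choose_succ_succ]
    push_cast; ring
  have hl : ∑ t ∈ Finset.range (k + 1), (k.choose t : Int) * f t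
      = (∑ t ∈ Finset.range (k + 1), (k.choose (t + 1) : Int) * f (t + 1)) + f 0 := by
    rw [Finset.sum_range_succ' (fun t => (k.choose t : Int) * f t) k,
      Finset.sum_range_succ (fun t => (k.choose (t + 1) : Int) * f (t + 1)) k]
    simp [Nat.choose_succ_self]
  rw [hr, hsplit, hl]; ring

lemma tsSum_succ (k : Nat) (xs : List Int) (j : Nat) :
    tsSum k xs (j + 1) + tsSum k xs j = tsSum (k + 1) xs j := by
  have h : tsSum k xs (j + 1)
      = ∑ t ∈ Finset.range (k + 1), (k.choose t : Int) * xs.getD (j + (t + 1)) 0 := by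
    unfold tsSum
    apply Finset.sum_congr rfl
    intro t _
    congr 2
    omega
  rw [h]
  unfold tsSum
  exact pascal_sum k (fun t => xs.getD (j + t) 0)

-- invariant of A's outer loop: after k ≥ 1 passes the row holds the mod-10 weighted sums
lemma iterA : ∀ (k : Nat), 1 ≤ k → ∀ (xs : List Int), k < xs.length →
    tsInner^[k] xs = (List.range (xs.length - k)).map (fun j => tsSum k xs j % 10) := by
  intro k
  induction k with
  | zero => intro h; omega
  | succ k ih =>
    intro _ xs hlt
    by_cases hk0 : k = 0
    · subst hk0
      rw [Function.iterate_one, tsInner_eq]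
      apply List.map_congr_left
      intro j _
      have htsum : tsSum 1 xs j = xs.getD (j + 1) 0 + xs.getD j 0 := by
        simp [tsSum, Finset.sum_range_succ]
        ring
      rw [htsum]
    · have hk1 : 1 ≤ k := Nat.one_le_iff_ne_zero.mpr hk0
      rw [Function.iterate_succ_apply', ih hk1 xs (by omega), tsInner_eq]
      have hlen : ((List.range (xs.length - k)).map (fun j => tsSum k xs j % 10)).length
          = xs.length - k := by simp
      rw [hlen]
      have hm : xs.length - k - 1 = xs.length - (k + 1) := by omega
      rw [hm]
      apply List.map_congr_left
      intro j hj
      have hj' : j < xs.length - (k + 1) := List.mem_range.mp hj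
      rw [myGetD _ _ _ (by omega), myGetD _ _ _ (by omega), ← Int.add_emod, tsSum_succ]

-- A computes tsSum (n-1) · % 10 on lists of length ≥ 2
lemma A_eq (nums : List Int) (h2 : 2 ≤ nums.length) :
    triangularSum2 nums = tsSum (nums.length - 1) nums 0 % 10 := by
  unfold triangularSum2
  have hfold : (PySem.List.pyRange 0 ((nums.length : Int) - 1) 1).foldl
      (fun t1 _ => tsInner t1) nums = tsInner^[nums.length - 1] nums := by
    rw [foldl_const_iterate]
    congr 1
    rw [PySem.List.length_pyRange_one]
    omega
  rw [hfold, iterA (nums.length - 1) (by omega) nums (by omega)]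
  have h1 : nums.length - (nums.length - 1) = 1 := by omega
  rw [h1]
  simp [List.range_one]

-- invariant of B's fold: the binomial coefficient is maintained exactly
lemma foldB (m : Nat) (nums : List Int) (hn : (nums.length : Int) = (m : Int) + 1) :
    ∀ (ys : List Int) (i : Nat) (tot : Int), i + ys.length = m + 1 →
    ((PySem.List.enumerate ys (i : Int)).foldl
      (fun (tc : Int × Int) p =>
        (tc.1 + p.2 * tc.2,
         PySem.Int.floordiv (tc.2 * ((nums.length : Int) - 1 - p.1)) (p.1 + 1)))
      (tot, (m.choose i : Int))).1
    = tot + ∑ t ∈ Finset.range ys.length, (m.choose (i + t) : Int) * ys.getD t 0 := by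
  intro ys
  induction ys with
  | nil => intro i tot _; simp [PySem.List.enumerate_nil]
  | cons x ys ih =>
    intro i tot hi
    have hi' : i + ys.length + 1 = m + 1 := by simpa [List.length_cons, ← Nat.add_assoc] using hi
    have him : i ≤ m := by omega
    rw [PySem.List.enumerate_cons, List.foldl_cons]
    have hdiv : PySem.Int.floordiv ((m.choose i : Int) * ((nums.length : Int) - 1 - (i : Int)))
        ((i : Int) + 1) = (m.choose (i + 1) : Int) := by
      have h1 : (nums.length : Int) - 1 - (i : Int) = ((m - i : Nat) : Int) := by omega
      have h2 : m.choose i * (m - i) = m.choose (i + 1) * (i + 1) :=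
        (Nat.choose_succ_right_eq m i).symm
      have h3 : ((i : Int)) + 1 = ((i + 1 : Nat) : Int) := by push_cast; ring
      rw [h1, h3,
        show (m.choose i : Int) * ((m - i : Nat) : Int) = ((m.choose i * (m - i) : Nat) : Int)
          from by push_cast; ring,
        h2, PySem.Int.floordiv_natCast, Nat.mul_div_cancel _ (by omega)]
    dsimp only
    rw [hdiv]
    have h4 : ((i : Int)) + 1 = ((i + 1 : Nat) : Int) := by push_cast; ring
    rw [h4, ih (i + 1) (tot + x * (m.choose i : Int)) (by omega)]
    have hrhs : ∑ t ∈ Finset.range (x :: ys).length, (m.choose (i + t) : Int) * (x :: ys).getD t 0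
        = (∑ t ∈ Finset.range ys.length, (m.choose (i + 1 + t) : Int) * ys.getD t 0)
          + (m.choose i : Int) * x := by
      rw [List.length_cons,
        Finset.sum_range_succ' (fun t => (m.choose (i + t) : Int) * (x :: ys).getD t 0) ys.length]
      congr 1
      apply Finset.sum_congr rfl
      intro t _
      have he' : i + (t + 1) = i + 1 + t := by omega
      rw [he']
      rfl
    rw [hrhs]
    ring

-- B computes tsSum (n-1) · % 10 on lists of length ≥ 2
lemma B_eq (nums : List Int) (h2 : 2 ≤ nums.length) :
    triangularSum2_alt nums = tsSum (nums.length - 1) nums 0 % 10 := by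
  unfold triangularSum2_alt
  rw [if_neg (by omega)]
  have hn : (nums.length : Int) = ((nums.length - 1 : Nat) : Int) + 1 := by omega
  have hfb := foldB (nums.length - 1) nums hn nums 0 0 (by omega)
  simp only [Nat.cast_zero, Nat.choose_zero_right, Nat.cast_one, zero_add] at hfb
  rw [hfb, PySem.Int.mod_eq_emod_of_pos (by norm_num)]
  congr 1
  unfold tsSum
  have hlen : nums.length - 1 + 1 = nums.length := by omega
  rw [hlen]
  apply Finset.sum_congr rfl
  intro t _
  simp

-- ===== VERDICT (by name: the statement is the Claim_ definition above) =====
theorem triangularSum2_spec : Claim_equal_triangularSum2 := by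
  intro nums _ hpre
  unfold Spec_triangularSum2
  rcases Nat.lt_or_ge nums.length 2 with h | h
  · have h1 : nums.length = 1 := by
      have h0 : nums ≠ [] := hpre
      have := List.length_pos_iff.mpr h0
      omega
    unfold triangularSum2 triangularSum2_alt
    rw [if_pos (by rw [h1]; norm_num)]
    have he : PySem.List.pyRange 0 ((nums.length : Int) - 1) 1 = [] := by
      rw [h1]; decide
    rw [he]
    rfl
  · rw [A_eq nums h, B_eq nums h]
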